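-- pv_equiv track=rewrite | github.com/anjli01/Python-Functions | 19.py | concatenate_dict_list_values
-- ===== SOURCE A (Python) =====
-- from collections import Counter, defaultdict
-- from typing import (Any, Callable, Dict, List, Sequence, Tuple, Union,
--                     Optional)
--
-- def concatenate_dict_list_values(
--     list_of_dicts: List[Dict[str, List[Any]]]
-- ) -> Dict[str, List[Any]]:
--     """
--     Concatenates values from a list of dictionaries that share the same key.
--
--     Args:
--         list_of_dicts: A list where each item is a dictionary with
--                        list values.
--
--     Returns:
--         A single dictionary with concatenated list values for each key.
--     """
--     # defaultdict simplifies the logic by providing a default value (an empty list)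
--     # for keys that haven't been seen yet.
--     result = defaultdict(list)
--     for d in list_of_dicts:
--         for key, value in d.items():
--             result[key].extend(value)
--     return dict(result)
-- ===== SOURCE B (Python) =====
-- def concatenate_dict_list_values(list_of_dicts):
--     """
--     Concatenates values from a list of dictionaries that share the same key.
--
--     Two-pass group-by-key: gather keys in first-seen order, then for each
--     key concatenate that key's list from every dict that contains it.
--     """
--     keys = list(dict.fromkeys(k for d in list_of_dicts for k in d))
--     return {k: [x for d in list_of_dicts for x in d.get(k, [])] for k in keys}
-- ===== Notes on version B (the rewrite author's own statement) =====
-- stated objective: alternative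
-- what changed: Replaces the streaming defaultdict accumulation with a two-pass group-by-key: first collect keys in first-seen order via dict.fromkeys, then build each key's concatenated list by scanning the dicts per key.
import Mathlib
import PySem

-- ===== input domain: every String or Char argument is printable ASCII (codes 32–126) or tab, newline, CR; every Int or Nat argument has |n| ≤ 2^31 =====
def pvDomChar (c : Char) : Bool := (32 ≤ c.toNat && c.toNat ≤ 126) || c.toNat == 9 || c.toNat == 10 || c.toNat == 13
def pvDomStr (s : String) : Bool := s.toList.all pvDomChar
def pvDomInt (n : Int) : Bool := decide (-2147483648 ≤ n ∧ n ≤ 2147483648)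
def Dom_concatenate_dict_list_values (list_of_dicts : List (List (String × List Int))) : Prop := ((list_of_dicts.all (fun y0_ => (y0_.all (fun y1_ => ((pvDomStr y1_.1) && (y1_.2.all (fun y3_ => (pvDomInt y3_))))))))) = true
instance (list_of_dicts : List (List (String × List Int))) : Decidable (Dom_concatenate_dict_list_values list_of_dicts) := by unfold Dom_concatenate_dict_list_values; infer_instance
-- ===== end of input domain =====

-- B replaces A's streaming defaultdict accumulation with a two-pass group-by-key
-- (ordered key list first, then one concatenation per key); alternative decomposition, same results.

-- ===== PORT A =====
-- result = defaultdict(list); for d in …: for key, value in d.items(): result[key].extend(value); return dict(result)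
def concatenate_dict_list_values (list_of_dicts : List (List (String × List Int))) : List (String × List Int) :=
  (list_of_dicts.foldl
    (fun res d => d.foldl (fun res kv => res.modify kv.1 [] (· ++ kv.2)) res)
    PySem.Dict.empty).items

-- ===== PORT B =====
-- keys = list(dict.fromkeys(k for d in list_of_dicts for k in d))
-- return {k: [x for d in list_of_dicts for x in d.get(k, [])] for k in keys}
def concatenate_dict_list_values_alt (list_of_dicts : List (List (String × List Int))) : List (String × List Int) :=
  (PySem.List.dedup (list_of_dicts.flatMap (fun d => d.map (·.1)))).map
    (fun k => (k, (list_of_dicts.map (fun d => (PySem.Dict.mk d).getD k [])).flatten))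

-- ===== PRECONDITION & SPEC =====
-- Pre_ excludes association lists whose inner lists carry a duplicate key: such a list does not
-- represent a Python dict (Python dicts cannot hold duplicate keys), so neither program is ever
-- handed one and the claim says nothing there.
def Pre_concatenate_dict_list_values (list_of_dicts : List (List (String × List Int))) : Prop :=
  ∀ d ∈ list_of_dicts, (d.map Prod.fst).Nodup
instance (list_of_dicts : List (List (String × List Int))) : Decidable (Pre_concatenate_dict_list_values list_of_dicts) := by unfold Pre_concatenate_dict_list_values; infer_instance
def pvWitness_concatenate_dict_list_values : (List (List (String × List Int))) :=
  [[("a", [1, 2])], [("b", [3]), ("a", [4])], []]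
def Spec_concatenate_dict_list_values (list_of_dicts : List (List (String × List Int))) (out : List (String × List Int)) : Prop := out = concatenate_dict_list_values_alt list_of_dicts
instance (list_of_dicts : List (List (String × List Int))) (out : List (String × List Int)) : Decidable (Spec_concatenate_dict_list_values list_of_dicts out) := by unfold Spec_concatenate_dict_list_values; infer_instance

-- ===== CLAIM (what is proved, stated in full; the proofs are below) =====
def Claim_equal_concatenate_dict_list_values : Prop := ∀ (list_of_dicts : List (List (String × List Int))), Dom_concatenate_dict_list_values list_of_dicts → Pre_concatenate_dict_list_values list_of_dicts → Spec_concatenate_dict_list_values list_of_dicts (concatenate_dict_list_values list_of_dicts)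

-- ===== LEMMAS AND PROOFS =====

-- value of A's accumulator at a key after folding one dict's items in
theorem pv_inner_getD (d : List (String × List Int)) (res : PySem.Dict String (List Int)) (k : String) :
    (d.foldl (fun res kv => res.modify kv.1 [] (· ++ kv.2)) res).getD k []
      = res.getD k [] ++ ((d.filter (fun p => p.1 == k)).map (·.2)).flatten := by
  induction d generalizing res with
  | nil => simp
  | cons kv rest ih =>
    simp only [List.foldl_cons, ih, List.filter_cons]
    rw [PySem.Dict.getD_modify]
    by_cases h : kv.1 = k
    · simp [h, List.append_assoc]
    · simp [h, Ne.symm h]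

-- value of A's accumulator at a key after folding all dicts in
theorem pv_outer_getD (l : List (List (String × List Int))) (res : PySem.Dict String (List Int)) (k : String) :
    (l.foldl (fun res d => d.foldl (fun res kv => res.modify kv.1 [] (· ++ kv.2)) res) res).getD k []
      = res.getD k [] ++ (l.map (fun d => ((d.filter (fun p => p.1 == k)).map (·.2)).flatten)).flatten := by
  induction l generalizing res with
  | nil => simp
  | cons d rest ih => simp [ih, pv_inner_getD, List.append_assoc]

-- keys of A's accumulator after folding all dicts in
theorem pv_outer_keys (l : List (List (String × List Int))) (res : PySem.Dict String (List Int)) :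
    (l.foldl (fun res d => d.foldl (fun res kv => res.modify kv.1 [] (· ++ kv.2)) res) res).keys
      = PySem.Set.update res.keys (l.flatMap (fun d => d.map (·.1))) := by
  induction l generalizing res with
  | nil => simp [PySem.Set.update_nil]
  | cons d rest ih =>
    simp only [List.foldl_cons, ih, List.flatMap_cons, PySem.Set.update_append]
    congr 1
    exact PySem.Dict.keys_foldl_modify_key d Prod.fst [] (fun _ kv => (· ++ kv.2)) res

theorem pv_outer_nodup (l : List (List (String × List Int))) (res : PySem.Dict String (List Int))
    (h : res.keys.Nodup) :
    (l.foldl (fun res d => d.foldl (fun res kv => res.modify kv.1 [] (· ++ kv.2)) res) res).keys.Nodup := by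
  induction l generalizing res with
  | nil => exact h
  | cons d rest ih =>
    exact ih _ (PySem.Dict.nodup_keys_foldl_modify_key d Prod.fst [] (fun _ kv => (· ++ kv.2)) res h)

-- first-match lookup on a dup-free association list is the flattened filter by that key
theorem pv_getD_mk (d : List (String × List Int)) (k : String) (h : (d.map Prod.fst).Nodup) :
    (PySem.Dict.mk d).getD k [] = ((d.filter (fun p => p.1 == k)).map (·.2)).flatten := by
  induction d with
  | nil => rfl
  | cons kv rest ih =>
    simp only [List.map_cons, List.nodup_cons] at h
    rw [PySem.Dict.getD_eq_get?_getD, PySem.Dict.get?_mk_cons, List.filter_cons]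
    by_cases hk : kv.1 = k
    · have hrest : rest.filter (fun p => p.1 == k) = [] := by
        rw [List.filter_eq_nil_iff]
        intro p hp
        simp only [beq_iff_eq]
        intro hpk
        exact h.1 (by rw [hk, ← hpk]; exact List.mem_map_of_mem (f := Prod.fst) hp)
      simp [hk, hrest]
    · rw [if_neg (by simp [hk]), if_neg (by simp [hk]), ← PySem.Dict.getD_eq_get?_getD]
      exact ih h.2

-- ===== VERDICT (by name: the statement is the Claim_ definition above) =====
theorem concatenate_dict_list_values_spec : Claim_equal_concatenate_dict_list_values := by
  intro l _ hpre
  show _ = _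
  unfold concatenate_dict_list_values concatenate_dict_list_values_alt
  rw [PySem.Dict.items_eq_map_keys _ (pv_outer_nodup l _ (by simp)) [],
      pv_outer_keys, PySem.Dict.keys_empty, PySem.Set.update_nil_left, ← PySem.List.dedup_eq_ofList]
  refine List.map_congr_left (fun k _ => ?_)
  rw [pv_outer_getD]
  simp only [PySem.Dict.getD_empty, List.nil_append]
  exact congrArg (fun v => (k, List.flatten v)) (List.map_congr_left (fun d hd => (pv_getD_mk d k (hpre d hd)).symm))
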